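-- pv_equiv track=rewrite | github.com/JanZon00/Python | zestaw3/zadanie3.py | odwracanie
-- ===== SOURCE A (Python) =====
-- def odwracanie(L, left, right) :
--
--     idx = left
--     for i in range(left, right):
--         if left == right :
--             break
--         else:
--             for j in range(0, right-left):
--                 temp = L[idx+1]
--                 L[idx+1] = L[idx]
--                 L[idx] = temp
--                 idx += 1
--
--             idx = left
--             right -= 1
--     return L
-- ===== SOURCE B (Python) =====
-- def odwracanie(L, left, right):
--     if left < right:
--         L[left:right+1] = L[left:right+1][::-1]
--     return L
-- ===== Notes on version B (the rewrite author's own statement) =====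
-- stated objective: idiomatic
-- what changed: Replaced A's repeated bubble-the-head-to-the-right adjacent-swap passes over the segment by Python's idiomatic slice-reversal assignment L[left:right+1] = L[left:right+1][::-1], skipped when left >= right.
-- outside the precondition, e.g. on odwracanie([1, 5], -1, 1): A returns [5, 1], B returns [1, 5]
import Mathlib
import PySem

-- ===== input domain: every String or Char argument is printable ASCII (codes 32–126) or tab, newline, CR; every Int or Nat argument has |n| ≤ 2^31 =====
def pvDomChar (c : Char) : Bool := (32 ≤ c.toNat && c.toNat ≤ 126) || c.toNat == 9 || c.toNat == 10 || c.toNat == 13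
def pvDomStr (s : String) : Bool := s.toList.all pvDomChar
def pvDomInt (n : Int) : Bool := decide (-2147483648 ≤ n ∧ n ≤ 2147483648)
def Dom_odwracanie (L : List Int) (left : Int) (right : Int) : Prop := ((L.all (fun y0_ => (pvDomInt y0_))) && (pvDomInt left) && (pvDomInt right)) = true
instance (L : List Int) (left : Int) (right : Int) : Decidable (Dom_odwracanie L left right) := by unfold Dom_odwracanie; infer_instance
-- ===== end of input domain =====

-- B replaces A's repeated adjacent-swap bubbling passes by Python's idiomatic slice-reversal assignment; equivalence is about the RETURN value (both Pythons also mutate L in place).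

-- ===== PORT A =====
-- the body of A's inner 'for j' loop: temp = L[idx+1]; L[idx+1] = L[idx]; L[idx] = temp; idx += 1
def odwInnerStep (p : List Int × Int) : List Int × Int :=
  let temp := PySem.List.pyGetD p.1 (p.2 + 1) 0
  let L1 := PySem.List.pySetD p.1 (p.2 + 1) (PySem.List.pyGetD p.1 p.2 0)
  (PySem.List.pySetD L1 p.2 temp, p.2 + 1)

-- the body of A's outer 'for i' loop; state (L, idx, right, done) where done models 'break'
def odwOuterStep (left : Int) (st : List Int × Int × Int × Bool) : List Int × Int × Int × Bool :=
  match st with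
  | (L, idx, right, done) =>
    if done then (L, idx, right, done)
    else if left = right then (L, idx, right, true)
    else
      let p := (PySem.List.pyRange 0 (right - left) 1).foldl (fun q _j => odwInnerStep q) (L, idx)
      (p.1, left, right - 1, done)

def odwracanie (L : List Int) (left : Int) (right : Int) : List Int :=
  let idx := left
  ((PySem.List.pyRange left right 1).foldl (fun st _i => odwOuterStep left st) (L, idx, right, false)).1

-- ===== PORT B =====
-- Source B: if left < right: L[left:right+1] = L[left:right+1][::-1]; return L.
-- '[::-1]' is ported as List.reverse (PySem.List.slice?_none_none_neg_one); the step-1 slice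
-- ASSIGNMENT is ported by hand and is exact: CPython clamps both bounds like a slice read
-- (PySem.List.clampIdx) and splices the new elements between L[:a'] and L[max b' a':].
def odwracanie_alt (L : List Int) (left : Int) (right : Int) : List Int :=
  if left < right then
    let mid := (PySem.List.slice L (some left) (some (right + 1))).reverse
    let a' := PySem.List.clampIdx L.length left
    let b' := PySem.List.clampIdx L.length (right + 1)
    List.take a' L ++ mid ++ List.drop (max b' a') L
  else L

-- ===== PRECONDITION & SPEC =====
-- Pre_ excludes inputs with left < right where right ≥ len(L) (A raises IndexError) or left < 0
-- (there both programs' returned values are accidental artefacts of Python negative-index wraparound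
-- and neither is the specified segment reversal).
def Pre_odwracanie (L : List Int) (left : Int) (right : Int) : Prop :=
  left < right → 0 ≤ left ∧ right < (L.length : Int)
instance (L : List Int) (left : Int) (right : Int) : Decidable (Pre_odwracanie L left right) := by
  unfold Pre_odwracanie; infer_instance

def pvWitness_odwracanie : List Int × Int × Int := ([1, 2, 3, 4], 1, 3)

def Spec_odwracanie (L : List Int) (left : Int) (right : Int) (out : List Int) : Prop := out = odwracanie_alt L left right
instance (L : List Int) (left : Int) (right : Int) (out : List Int) : Decidable (Spec_odwracanie L left right out) := by unfold Spec_odwracanie; infer_instance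

-- ===== CLAIM (what is proved, stated in full; the proofs are below) =====
def Claim_equal_odwracanie : Prop := ∀ (L : List Int) (left : Int) (right : Int), Dom_odwracanie L left right → Pre_odwracanie L left right → Spec_odwracanie L left right (odwracanie L left right)

-- ===== LEMMAS AND PROOFS =====

-- a fold that ignores the list elements is function iteration
theorem foldl_const_iterate {α β : Type} (f : α → α) : ∀ (l : List β) (s : α),
    List.foldl (fun s _ => f s) s l = f^[l.length] s := by
  intro l
  induction l with
  | nil => intro s; rfl
  | cons x xs ih => intro s; simp [List.foldl, ih, Function.iterate_succ_apply]

-- one inner pass of A bubbles the head of the segment to its right end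
theorem inner_pass (a : Int) : ∀ (T P S : List Int),
    odwInnerStep^[T.length] (P ++ a :: T ++ S, (P.length : Int)) =
      (P ++ T ++ a :: S, (P.length : Int) + T.length) := by
  intro T
  induction T with
  | nil => intro P S; simp
  | cons t T' ih =>
    intro P S
    rw [List.length_cons, Function.iterate_succ_apply]
    have hstep : odwInnerStep (P ++ a :: t :: T' ++ S, (P.length : Int)) =
        (P ++ t :: a :: T' ++ S, (P.length : Int) + 1) := by
      have h1 : ((P.length : Int) + 1) = ((P.length + 1 : Nat) : Int) := by push_cast; ring
      simp only [odwInnerStep, h1, PySem.List.pyGetD_natCast, PySem.List.pySetD_natCast]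
      simp
    rw [hstep]
    have h2 : odwInnerStep^[T'.length] (P ++ t :: a :: T' ++ S, (P.length : Int) + 1) =
        (P ++ t :: T' ++ a :: S, ((P.length : Int) + 1) + T'.length) := by
      have h3 := ih (P ++ [t]) S
      push_cast at h3
      simpa [List.append_assoc] using h3
    rw [h2]
    refine Prod.ext rfl ?_
    push_cast
    ring

-- m passes of A's outer loop reverse a segment of length m + 1
theorem outer_pass : ∀ (m : Nat) (M P S : List Int), M.length = m + 1 →
    (fun st => odwOuterStep (P.length : Int) st)^[m]
        (P ++ M ++ S, (P.length : Int), (P.length : Int) + m, false) =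
      (P ++ M.reverse ++ S, (P.length : Int), (P.length : Int), false) := by
  intro m
  induction m with
  | zero =>
    intro M P S hM
    obtain ⟨a, rfl⟩ := List.length_eq_one_iff.mp hM
    simp
  | succ m ih =>
    intro M P S hM
    obtain ⟨a, T, rfl⟩ : ∃ a T, M = a :: T := by
      cases M with
      | nil => simp at hM
      | cons a T => exact ⟨a, T, rfl⟩
    have hT : T.length = m + 1 := by simpa using hM
    rw [Function.iterate_succ_apply]
    have hstep : odwOuterStep (P.length : Int)
        (P ++ (a :: T) ++ S, (P.length : Int), (P.length : Int) + ((m : Int) + 1), false) =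
        (P ++ T ++ a :: S, (P.length : Int), (P.length : Int) + m, false) := by
      simp only [odwOuterStep]
      rw [if_neg (by simp), if_neg (by intro h; omega)]
      have hcnt : ((P.length : Int) + ((m : Int) + 1) - (P.length : Int)) = ((m + 1 : Nat) : Int) := by
        push_cast; ring
      rw [foldl_const_iterate, PySem.List.length_pyRange_one, hcnt]
      have hlen : (((m + 1 : Nat) : Int) - 0).toNat = T.length := by omega
      rw [hlen]
      have hip := inner_pass a T P S
      simp only [List.cons_append, List.append_assoc] at hip ⊢
      rw [hip]
      refine Prod.ext rfl (Prod.ext rfl (Prod.ext ?_ rfl))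
      push_cast; ring
    have hcast : ((P.length : Int) + ((m + 1 : Nat) : Int)) = (P.length : Int) + ((m : Int) + 1) := by
      push_cast; ring
    rw [hcast, hstep]
    have h2 := ih T P (a :: S) hT
    rw [h2]
    simp

-- ===== VERDICT (by name: the statement is the Claim_ definition above) =====
theorem odwracanie_spec : Claim_equal_odwracanie := by
  intro L left right _hdom hpre
  unfold Spec_odwracanie odwracanie odwracanie_alt
  by_cases h : left < right
  · obtain ⟨h0, hr⟩ := hpre h
    rw [if_pos h]
    show ((PySem.List.pyRange left right 1).foldl (fun st _i => odwOuterStep left st)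
        (L, left, right, false)).1 =
      List.take (PySem.List.clampIdx L.length left) L ++
        (PySem.List.slice L (some left) (some (right + 1))).reverse ++
        List.drop (max (PySem.List.clampIdx L.length (right + 1)) (PySem.List.clampIdx L.length left)) L
    have hl : left = (left.toNat : Int) := (Int.toNat_of_nonneg h0).symm
    have hrn : right = (right.toNat : Int) := (Int.toNat_of_nonneg (by omega)).symm
    set l := left.toNat with hldef
    set r := right.toNat with hrdef
    have hlr : l < r := by omega
    have hrlen : r < L.length := by omega
    set P := L.take l with hPdef
    set M := (L.drop l).take (r - l + 1) with hMdef
    set S := L.drop (r + 1) with hSdef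
    have hP : P.length = l := by simp [hPdef]; omega
    have hM : M.length = (r - l) + 1 := by simp [hMdef]; omega
    have hL : L = P ++ M ++ S := by
      have h1 := List.take_append_drop l L
      have h2 := List.take_append_drop (r - l + 1) (L.drop l)
      rw [List.drop_drop] at h2
      have h3 : l + (r - l + 1) = r + 1 := by omega
      rw [h3] at h2
      rw [List.append_assoc, hPdef, hMdef, hSdef, h2, h1]
    -- the pieces of B's slice assignment
    have ha' : PySem.List.clampIdx L.length left = l := by
      unfold PySem.List.clampIdx; split_ifs <;> omega
    have hb' : PySem.List.clampIdx L.length (right + 1) = r + 1 := by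
      unfold PySem.List.clampIdx; split_ifs <;> omega
    have hmid : PySem.List.slice L (some left) (some (right + 1)) = M := by
      have e1 : right + 1 = ((r + 1 : Nat) : Int) := by push_cast; omega
      rw [hl, e1, PySem.List.slice_natCast]
      have e2 : r + 1 - l = r - l + 1 := by omega
      rw [e2, hMdef]
    rw [ha', hb', hmid]
    have hmax : max (r + 1) l = r + 1 := by omega
    rw [hmax]
    -- A's outer loop as an iteration
    rw [foldl_const_iterate, PySem.List.length_pyRange_one]
    have hcnt : (right - left).toNat = r - l := by omega
    rw [hcnt]
    have hA := outer_pass (r - l) M P S (by omega)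
    have hleft : left = ((P.length : Nat) : Int) := by rw [hP]; exact hl
    have hright : right = ((P.length : Nat) : Int) + ((r - l : Nat) : Int) := by
      rw [hP]; omega
    calc ((fun st => odwOuterStep left st)^[r - l] (L, left, right, false)).1
        = ((fun st => odwOuterStep ((P.length : Nat) : Int) st)^[r - l]
            (P ++ M ++ S, ((P.length : Nat) : Int), ((P.length : Nat) : Int) + ((r - l : Nat) : Int), false)).1 := by
          rw [← hright, ← hleft, ← hL]
      _ = P ++ M.reverse ++ S := by rw [hA]
      _ = List.take l L ++ M.reverse ++ List.drop (r + 1) L := by rw [← hPdef, ← hSdef]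
  · -- left ≥ right: A's loop runs zero passes and B's guard skips the assignment
    rw [if_neg h]
    have hnil : PySem.List.pyRange left right 1 = [] := by
      rw [PySem.List.pyRange_one]
      have : (right - left).toNat = 0 := by omega
      simp [this]
    rw [hnil]
    rfl
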